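-- pv_equiv track=rewrite | github.com/ndyankov/pycourse | lecture5/egn.py | generate
-- ===== SOURCE A (Python) =====
-- def calc_checksum(digits):
--     weights = (2,4,8,5,10,9,7,3,6)
--     check = sum([weights[i]*digits[i] for i in range(9)]) % 11
--     if check == 10:
--         check = 0
--     return check
--
-- def generate(year, month, day):
--     for area in range(1000):
--         tokens = []
--         tokens.append(str(year))
--         tokens.append(str(month).zfill(2))
--         tokens.append(str(day).zfill(2))
--
--         tokens.append(str(area).zfill(3))
--
--         digits = ''.join(tokens)
--         digits = [int(x) for x in digits]
--
--         check = calc_checksum(digits)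
--
--         tokens.append(str(check))
--
--         egn = ''.join(tokens)
--
--         yield egn
-- ===== SOURCE B (Python) =====
-- def generate(year, month, day):
--     # Digit-DP: enumerate the three area digits in nested loops, carrying an
--     # incremental weighted partial sum; never builds or parses a per-area string.
--     weights = (2, 4, 8, 5, 10, 9, 7, 3, 6)
--     prefix = str(year) + str(month).zfill(2) + str(day).zfill(2)
--     n = len(prefix)
--     base = sum(w * int(c) for w, c in zip(weights, prefix))
--     w0 = weights[n] if n < 9 else 0
--     w1 = weights[n + 1] if n + 1 < 9 else 0
--     w2 = weights[n + 2] if n + 2 < 9 else 0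
--     for d0 in range(10):
--         s0 = base + w0 * d0
--         for d1 in range(10):
--             s1 = s0 + w1 * d1
--             for d2 in range(10):
--                 c = (s1 + w2 * d2) % 11
--                 if c == 10:
--                     c = 0
--                 yield prefix + str(d0) + str(d1) + str(d2) + str(c)
-- ===== Notes on version B (the rewrite author's own statement) =====
-- stated objective: faster
-- what changed: B replaces A's single range(1000) loop that rebuilds, joins, re-parses and rescans the full 9-digit string per candidate by a digit-DP: three nested loops over the area digits carrying an incremental weighted partial sum (prefix contribution computed once via zip), and assembles each identifier directly from the digit characters.
import Mathlib
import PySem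

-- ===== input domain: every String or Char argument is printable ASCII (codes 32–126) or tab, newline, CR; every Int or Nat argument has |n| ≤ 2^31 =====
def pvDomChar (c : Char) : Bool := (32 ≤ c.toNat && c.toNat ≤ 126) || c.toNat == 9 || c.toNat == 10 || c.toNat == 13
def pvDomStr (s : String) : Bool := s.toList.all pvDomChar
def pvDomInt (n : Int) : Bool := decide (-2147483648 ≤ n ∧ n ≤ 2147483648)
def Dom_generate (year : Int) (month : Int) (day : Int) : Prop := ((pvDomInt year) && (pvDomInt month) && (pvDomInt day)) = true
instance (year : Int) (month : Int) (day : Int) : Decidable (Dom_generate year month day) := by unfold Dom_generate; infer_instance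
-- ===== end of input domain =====

set_option maxRecDepth 8192


-- B is a digit-DP: three nested loops over the area digits carrying an incremental weighted
-- partial sum, instead of A's per-area string rebuild/re-parse/rescan (objective: faster, constant-factor).

-- ===== PORT A =====
-- the tuple (2,4,8,5,10,9,7,3,6) of weights, shared by both ports
def pvWeights : List Int := [2, 4, 8, 5, 10, 9, 7, 3, 6]

-- int(x) for a single character x (exact on digit characters; Pre_ admits only inputs whose chars are digits)
def digitVal (c : Char) : Int := (PySem.Int.ofStr? (String.singleton c)).getD 0

def calc_checksum (digits : List Int) : Int :=
  let check := PySem.Int.mod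
    (((PySem.List.pyRange 0 9 1).map
        (fun i => PySem.List.pyGetD pvWeights i 0 * PySem.List.pyGetD digits i 0)).sum) 11
  if check = 10 then 0 else check

def generate (year : Int) (month : Int) (day : Int) : List String :=
  (PySem.List.pyRange 0 1000 1).map (fun area =>
    let tokens : List String :=
      [PySem.Int.toStr year,
       PySem.Str.zfill (PySem.Int.toStr month) 2,
       PySem.Str.zfill (PySem.Int.toStr day) 2,
       PySem.Str.zfill (PySem.Int.toStr area) 3]
    let digitsStr := PySem.Str.join "" tokens          -- ''.join(tokens)
    let digits := digitsStr.toList.map digitVal        -- [int(x) for x in digits]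
    let check := calc_checksum digits
    PySem.Str.join "" (tokens ++ [PySem.Int.toStr check]))

-- ===== PORT B =====
-- string '+'-concatenation is ported as ''-join; the generator's nested yields become flatMap/map
def generate_alt (year : Int) (month : Int) (day : Int) : List String :=
  let pfx := PySem.Str.join ""
    [PySem.Int.toStr year,
     PySem.Str.zfill (PySem.Int.toStr month) 2,
     PySem.Str.zfill (PySem.Int.toStr day) 2]
  let n : Int := PySem.Str.len pfx
  let base := ((pvWeights.zip pfx.toList).map (fun p => p.1 * digitVal p.2)).sum
  let w0 := if n < 9 then PySem.List.pyGetD pvWeights n 0 else 0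
  let w1 := if n + 1 < 9 then PySem.List.pyGetD pvWeights (n + 1) 0 else 0
  let w2 := if n + 2 < 9 then PySem.List.pyGetD pvWeights (n + 2) 0 else 0
  (PySem.List.pyRange 0 10 1).flatMap (fun d0 =>
    let s0 := base + w0 * d0
    (PySem.List.pyRange 0 10 1).flatMap (fun d1 =>
      let s1 := s0 + w1 * d1
      (PySem.List.pyRange 0 10 1).map (fun d2 =>
        let c := PySem.Int.mod (s1 + w2 * d2) 11
        let c := if c = 10 then 0 else c
        PySem.Str.join "" [pfx, PySem.Int.toStr d0, PySem.Int.toStr d1, PySem.Int.toStr d2,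
          PySem.Int.toStr c])))

-- ===== PRECONDITION & SPEC =====
-- Pre_ excludes exactly the inputs on which A raises: a negative year/month/day puts a '-' into the
-- joined string (int('-') raises ValueError), and a date prefix shorter than 6 digits (1-digit year
-- with no 3-digit month/day to compensate) makes the digit string shorter than 9, so calc_checksum's
-- digits[8] raises IndexError.
def Pre_generate (year : Int) (month : Int) (day : Int) : Prop :=
  0 ≤ year ∧ 0 ≤ month ∧ 0 ≤ day ∧ (10 ≤ year ∨ 100 ≤ month ∨ 100 ≤ day)
instance (year : Int) (month : Int) (day : Int) : Decidable (Pre_generate year month day) := by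
  unfold Pre_generate; infer_instance

def pvWitness_generate : Int × Int × Int := (1990, 1, 1)

def Spec_generate (year : Int) (month : Int) (day : Int) (out : List String) : Prop := out = generate_alt year month day
instance (year : Int) (month : Int) (day : Int) (out : List String) : Decidable (Spec_generate year month day out) := by unfold Spec_generate; infer_instance

-- ===== CLAIM (what is proved, stated in full; the proofs are below) =====
def Claim_equal_generate : Prop := ∀ (year : Int) (month : Int) (day : Int), Dom_generate year month day → Pre_generate year month day → Spec_generate year month day (generate year month day)

-- ===== LEMMAS AND PROOFS =====

-- the accumulator of Nat.toDigitsCore is a suffix of the result, hence a length lower bound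
lemma pv_toDigitsCore_le (b : Nat) : ∀ (f n : Nat) (ds : List Char),
    ds.length ≤ (Nat.toDigitsCore b f n ds).length := by
  intro f
  induction f with
  | zero => intro n ds; simp [Nat.toDigitsCore]
  | succ f ih =>
    intro n ds
    simp only [Nat.toDigitsCore]
    split
    · simp
    · exact le_trans (by simp) (ih _ _)

-- with positive fuel the core produces at least one character on top of the accumulator
lemma pv_toDigitsCore_succ_le (b f n : Nat) (ds : List Char) :
    ds.length + 1 ≤ (Nat.toDigitsCore b (f + 1) n ds).length := by
  simp only [Nat.toDigitsCore]
  split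
  · simp
  · exact le_trans (by simp) (pv_toDigitsCore_le b f _ _)

-- str(n) has at least two characters for n ≥ 10
lemma pv_two_le_toChars_length (n : Int) (h : 10 ≤ n) : 2 ≤ (PySem.Int.toChars n).length := by
  have hn : ¬ n < 0 := by omega
  have h10 : 10 ≤ n.toNat := by omega
  simp only [PySem.Int.toChars, if_neg hn]
  unfold Nat.toDigits
  rcases Nat.exists_eq_add_of_le h10 with ⟨k, hk⟩
  rw [hk]
  show 2 ≤ (Nat.toDigitsCore 10 (10 + k + 1) (10 + k) []).length
  simp only [Nat.toDigitsCore]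
  rw [if_neg (by omega)]
  rw [show 10 + k = (9 + k) + 1 from by omega]
  have h2 := pv_toDigitsCore_succ_le 10 (9 + k) ((9 + k + 1) / 10) [((9 + k + 1) % 10).digitChar]
  simpa using h2

-- str(n) is nonempty for n ≥ 0
lemma pv_one_le_toChars_length (n : Int) (h : 0 ≤ n) : 1 ≤ (PySem.Int.toChars n).length := by
  simp only [PySem.Int.toChars, if_neg (by omega : ¬ n < 0)]
  unfold Nat.toDigits
  simpa using pv_toDigitsCore_succ_le 10 n.toNat n.toNat []

-- str(n) has at least three characters for n ≥ 100
lemma pv_three_le_toChars_length (n : Int) (h : 100 ≤ n) : 3 ≤ (PySem.Int.toChars n).length := by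
  have h100 : 100 ≤ n.toNat := by omega
  simp only [PySem.Int.toChars, if_neg (by omega : ¬ n < 0)]
  unfold Nat.toDigits
  rcases Nat.exists_eq_add_of_le h100 with ⟨k, hk⟩
  rw [hk]
  show 3 ≤ (Nat.toDigitsCore 10 (100 + k + 1) (100 + k) []).length
  simp only [Nat.toDigitsCore]
  rw [if_neg (by omega)]
  rw [show 100 + k = (99 + k) + 1 from by omega]
  simp only [Nat.toDigitsCore]
  rw [if_neg (by omega)]
  rw [show 99 + k = (98 + k) + 1 from by omega]
  have h3 := pv_toDigitsCore_succ_le 10 (98 + k) ((98 + k + 1 + 1) / 10 / 10)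
    [((98 + k + 1 + 1) / 10 % 10).digitChar, ((98 + k + 1 + 1) % 10).digitChar]
  simpa using h3

-- range(1000) enumerated by its three decimal digits, in order
lemma pv_range1000 : (PySem.List.pyRange 0 1000 1)
    = (PySem.List.pyRange 0 10 1).flatMap (fun d0 =>
        (PySem.List.pyRange 0 10 1).flatMap (fun d1 =>
          (PySem.List.pyRange 0 10 1).map (fun d2 => 100 * d0 + 10 * d1 + d2))) := by decide

-- str(100*d0+10*d1+d2).zfill(3) is the three digit characters in order
lemma pv_zfill3 : ∀ d0 ∈ PySem.List.pyRange 0 10 1, ∀ d1 ∈ PySem.List.pyRange 0 10 1,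
    ∀ d2 ∈ PySem.List.pyRange 0 10 1,
    (PySem.Str.zfill (PySem.Int.toStr (100 * d0 + 10 * d1 + d2)) 3).toList
      = PySem.Int.toChars d0 ++ PySem.Int.toChars d1 ++ PySem.Int.toChars d2 := by decide

-- int() of a single digit's character recovers the digit
lemma pv_digit : ∀ d ∈ PySem.List.pyRange 0 10 1, (PySem.Int.toChars d).map digitVal = [d] := by
  decide

-- splitting A's 9-term weighted sum into B's zip base plus the three weighted area digits
lemma pv_check_split (pd : List Int) (v0 v1 v2 : Int) (hL : 6 ≤ pd.length) :
    ((PySem.List.pyRange 0 9 1).map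
        (fun i => PySem.List.pyGetD pvWeights i 0 * PySem.List.pyGetD (pd ++ [v0, v1, v2]) i 0)).sum
  = ((pvWeights.zip pd).map (fun p => p.1 * p.2)).sum
    + (if (pd.length : Int) < 9 then PySem.List.pyGetD pvWeights (pd.length : Int) 0 else 0) * v0
    + (if (pd.length : Int) + 1 < 9 then PySem.List.pyGetD pvWeights ((pd.length : Int) + 1) 0 else 0) * v1
    + (if (pd.length : Int) + 2 < 9 then PySem.List.pyGetD pvWeights ((pd.length : Int) + 2) 0 else 0) * v2 := by
  have e9 : PySem.List.pyRange 0 9 1 = [0,1,2,3,4,5,6,7,8] := by decide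
  rcases (by omega : pd.length = 6 ∨ pd.length = 7 ∨ pd.length = 8 ∨ 9 ≤ pd.length) with h|h|h|h
  · obtain ⟨p0,p1,p2,p3,p4,p5,rfl⟩ :
        ∃ p0 p1 p2 p3 p4 p5, pd = [p0,p1,p2,p3,p4,p5] := by
      rcases pd with _|⟨p0,_|⟨p1,_|⟨p2,_|⟨p3,_|⟨p4,_|⟨p5,_|⟨p6,t⟩⟩⟩⟩⟩⟩⟩ <;>
        first
          | exact ⟨_,_,_,_,_,_, rfl⟩
          | exact absurd h (by simp)
    rw [e9]
    norm_num [pvWeights, List.getD, PySem.List.pyGetD_ofNat']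
    ring
  · obtain ⟨p0,p1,p2,p3,p4,p5,p6,rfl⟩ :
        ∃ p0 p1 p2 p3 p4 p5 p6, pd = [p0,p1,p2,p3,p4,p5,p6] := by
      rcases pd with _|⟨p0,_|⟨p1,_|⟨p2,_|⟨p3,_|⟨p4,_|⟨p5,_|⟨p6,_|⟨p7,t⟩⟩⟩⟩⟩⟩⟩⟩ <;>
        first
          | exact ⟨_,_,_,_,_,_,_, rfl⟩
          | exact absurd h (by simp)
    rw [e9]
    norm_num [pvWeights, List.getD, PySem.List.pyGetD_ofNat']
    ring
  · obtain ⟨p0,p1,p2,p3,p4,p5,p6,p7,rfl⟩ :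
        ∃ p0 p1 p2 p3 p4 p5 p6 p7, pd = [p0,p1,p2,p3,p4,p5,p6,p7] := by
      rcases pd with _|⟨p0,_|⟨p1,_|⟨p2,_|⟨p3,_|⟨p4,_|⟨p5,_|⟨p6,_|⟨p7,_|⟨p8,t⟩⟩⟩⟩⟩⟩⟩⟩⟩ <;>
        first
          | exact ⟨_,_,_,_,_,_,_,_, rfl⟩
          | exact absurd h (by simp)
    rw [e9]
    norm_num [pvWeights, List.getD, PySem.List.pyGetD_ofNat']
    ring
  · obtain ⟨a0,a1,a2,a3,a4,a5,a6,a7,a8,t,rfl⟩ :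
        ∃ a0 a1 a2 a3 a4 a5 a6 a7 a8 t, pd = a0::a1::a2::a3::a4::a5::a6::a7::a8::t := by
      rcases pd with _|⟨a0,_|⟨a1,_|⟨a2,_|⟨a3,_|⟨a4,_|⟨a5,_|⟨a6,_|⟨a7,_|⟨a8,t⟩⟩⟩⟩⟩⟩⟩⟩⟩ <;>
        first
          | exact ⟨_,_,_,_,_,_,_,_,_,_, rfl⟩
          | exact absurd h (by simp)
    rw [e9]
    have hlen : ((a0::a1::a2::a3::a4::a5::a6::a7::a8::t).length : Int) = 9 + (t.length : Int) := by
      simp; omega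
    rw [hlen]
    rw [if_neg (by omega), if_neg (by omega), if_neg (by omega)]
    norm_num [pvWeights, List.getD, PySem.List.pyGetD_ofNat']

-- ===== VERDICT (by name: the statement is the Claim_ definition above) =====
-- assembling the final identifier: same prefix characters, same area digit characters, same check string
lemma pv_assemble (Y M D A3 pfx : String) (hpfx : pfx.toList = Y.toList ++ M.toList ++ D.toList)
    (c0 c1 c2 : List Char) (hz : A3.toList = c0 ++ c1 ++ c2)
    (S0 S1 S2 SC : String) (h0 : S0.toList = c0) (h1 : S1.toList = c1) (h2 : S2.toList = c2) :
    PySem.Str.join "" ([Y, M, D, A3] ++ [SC]) = PySem.Str.join "" [pfx, S0, S1, S2, SC] := by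
  apply String.toList_inj.mp
  simp [PySem.Str.toList_join, PySem.Chars.join_cons_cons, PySem.Chars.join_singleton,
    hpfx, hz, h0, h1, h2, List.append_assoc]

-- zip-with-map on the character side equals zip on the digit side
lemma pv_zip_map (ws : List Int) (cs : List Char) :
    ((ws.zip (cs.map digitVal)).map (fun p => p.1 * p.2))
      = ((ws.zip cs).map (fun p => p.1 * digitVal p.2)) := by
  rw [List.zip_map_right, List.map_map]
  apply List.map_congr_left
  intro p _
  cases p
  rfl

set_option maxHeartbeats 2000000 in
theorem generate_spec : Claim_equal_generate := by
  intro year month day hdom hpre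
  obtain ⟨hy, hm, hd, hbig⟩ := hpre
  unfold Spec_generate
  simp only [generate, generate_alt]
  rw [pv_range1000, List.map_flatMap]
  apply List.flatMap_congr
  intro d0 hd0
  rw [List.map_flatMap]
  apply List.flatMap_congr
  intro d1 hd1
  rw [List.map_map]
  apply List.map_congr_left
  intro d2 hd2
  simp only [Function.comp]
  set Y := PySem.Int.toStr year with hY
  set M := PySem.Str.zfill (PySem.Int.toStr month) 2 with hM
  set D := PySem.Str.zfill (PySem.Int.toStr day) 2 with hD
  set A3 := PySem.Str.zfill (PySem.Int.toStr (100 * d0 + 10 * d1 + d2)) 3 with hA3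
  set pfx := PySem.Str.join "" [Y, M, D] with hpfxdef
  have hz : A3.toList = PySem.Int.toChars d0 ++ PySem.Int.toChars d1 ++ PySem.Int.toChars d2 :=
    pv_zfill3 d0 hd0 d1 hd1 d2 hd2
  have hpfx : pfx.toList = Y.toList ++ M.toList ++ D.toList := by
    rw [hpfxdef]
    simp [PySem.Str.toList_join, PySem.Chars.join_cons_cons, PySem.Chars.join_singleton,
      List.append_assoc]
  have hLen : 6 ≤ Y.toList.length + M.toList.length + D.toList.length := by
    rw [hY, hM, hD, PySem.Str.toList_zfill, PySem.Str.toList_zfill]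
    rw [PySem.Int.toList_toStr, PySem.Chars.length_zfill, PySem.Chars.length_zfill,
      PySem.Int.toList_toStr, PySem.Int.toList_toStr]
    have h1 := pv_one_le_toChars_length year hy
    rcases hbig with hb | hb | hb
    · have := pv_two_le_toChars_length year hb
      have := Nat.le_max_right (PySem.Int.toChars month).length 2
      have := Nat.le_max_right (PySem.Int.toChars day).length 2
      omega
    · have := pv_three_le_toChars_length month hb
      have := Nat.le_max_left (PySem.Int.toChars month).length 2
      have := Nat.le_max_right (PySem.Int.toChars day).length 2
      omega
    · have := pv_three_le_toChars_length day hb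
      have := Nat.le_max_right (PySem.Int.toChars month).length 2
      have := Nat.le_max_left (PySem.Int.toChars day).length 2
      omega
  have hjoin4 : (PySem.Str.join "" [Y, M, D, A3]).toList = pfx.toList ++ A3.toList := by
    rw [hpfx]
    simp [PySem.Str.toList_join, PySem.Chars.join_cons_cons, PySem.Chars.join_singleton,
      List.append_assoc]
  have hdig : (PySem.Str.join "" [Y, M, D, A3]).toList.map digitVal
      = pfx.toList.map digitVal ++ [d0, d1, d2] := by
    rw [hjoin4, List.map_append, hz, List.map_append, List.map_append,
      pv_digit d0 hd0, pv_digit d1 hd1, pv_digit d2 hd2]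
    simp
  have hL6 : 6 ≤ (pfx.toList.map digitVal).length := by
    rw [List.length_map, hpfx]
    simp only [List.length_append]
    omega
  have hn : PySem.Str.len pfx = ((pfx.toList.map digitVal).length : Int) := by
    rw [PySem.Str.len_eq, List.length_map]
  have hsum : ((PySem.List.pyRange 0 9 1).map
        (fun i => PySem.List.pyGetD pvWeights i 0 *
          PySem.List.pyGetD ((PySem.Str.join "" [Y, M, D, A3]).toList.map digitVal) i 0)).sum
      = ((pvWeights.zip pfx.toList).map (fun p => p.1 * digitVal p.2)).sum
        + (if PySem.Str.len pfx < 9 then PySem.List.pyGetD pvWeights (PySem.Str.len pfx) 0 else 0) * d0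
        + (if PySem.Str.len pfx + 1 < 9 then PySem.List.pyGetD pvWeights (PySem.Str.len pfx + 1) 0 else 0) * d1
        + (if PySem.Str.len pfx + 2 < 9 then PySem.List.pyGetD pvWeights (PySem.Str.len pfx + 2) 0 else 0) * d2 := by
    rw [hdig, pv_check_split (pfx.toList.map digitVal) d0 d1 d2 hL6, pv_zip_map, hn]
  simp only [calc_checksum]
  rw [hsum]
  exact pv_assemble Y M D A3 pfx hpfx _ _ _ hz _ _ _ _
    (PySem.Int.toList_toStr d0) (PySem.Int.toList_toStr d1) (PySem.Int.toList_toStr d2)
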